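-- pv_equiv track=rewrite | github.com/ldg1036/AI_TF_CODEREVIEW | backend/core/autofix_tokenizer.py | _line_col_from_pos
-- ===== SOURCE A (Python) =====
-- from typing import Dict, List, Optional, Tuple, TypedDict
--
-- def _line_col_from_pos(starts: List[int], pos: int) -> Tuple[int, int]:
--     line = 1
--     low = 0
--     high = len(starts) - 1
--     while low <= high:
--         mid = (low + high) // 2
--         if starts[mid] <= pos:
--             line = mid + 1
--             low = mid + 1
--         else:
--             high = mid - 1
--     col = (pos - starts[line - 1]) + 1
--     return line, max(1, col)
-- ===== SOURCE B (Python) =====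
-- from typing import List, Tuple
--
-- def _line_col_from_pos(starts: List[int], pos: int) -> Tuple[int, int]:
--     line = 1
--     for i, s in enumerate(starts):
--         if s > pos:
--             break
--         line = i + 1
--     col = (pos - starts[line - 1]) + 1
--     return line, max(1, col)
-- ===== Notes on version B (the rewrite author's own statement) =====
-- stated objective: simpler
-- what changed: Replaces the hand-written binary search over line-start offsets with a single forward scan that advances the line while starts[i] <= pos and breaks at the first larger offset.
-- outside the precondition, e.g. on _line_col_from_pos([9, 0, 0], 5): A returns (3, 6), B returns (1, 1)
import Mathlib
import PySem

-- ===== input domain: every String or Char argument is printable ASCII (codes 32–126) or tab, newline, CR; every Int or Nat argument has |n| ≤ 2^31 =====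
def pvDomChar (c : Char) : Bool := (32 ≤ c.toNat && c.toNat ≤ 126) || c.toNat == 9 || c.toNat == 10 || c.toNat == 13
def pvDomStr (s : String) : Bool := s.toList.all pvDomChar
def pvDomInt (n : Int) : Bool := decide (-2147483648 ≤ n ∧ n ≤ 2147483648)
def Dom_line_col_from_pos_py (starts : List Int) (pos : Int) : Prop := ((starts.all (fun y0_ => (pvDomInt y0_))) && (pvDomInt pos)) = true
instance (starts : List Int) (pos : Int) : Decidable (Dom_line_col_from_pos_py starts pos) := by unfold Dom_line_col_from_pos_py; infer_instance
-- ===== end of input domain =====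

-- B replaces A's binary search with a plain forward scan over the sorted line starts (simpler, same result on sorted input).

-- ===== PORT A =====
-- the while loop of A: state (line, low, high); starts[mid] is in range on every
-- iteration whenever 0 ≤ low ∧ high < len (maintained from the initial call), so pyGetD is exact there
-- fuel = starts.length bounds the number of iterations (each step halves high - low; proved
-- sufficient in pv_aloop_max), so the fuel case never fires on the initial call
def pvAloop (starts : List Int) (pos : Int) : Nat → Int → Int → Int → Int
  | 0, line, _, _ => line
  | n + 1, line, low, high =>
    if low ≤ high then
      let mid := PySem.Int.floordiv (low + high) 2
      if PySem.List.pyGetD starts mid 0 ≤ pos then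
        pvAloop starts pos n (mid + 1) (mid + 1) high
      else
        pvAloop starts pos n line low (mid - 1)
    else line

def line_col_from_pos_py (starts : List Int) (pos : Int) : Int × Int :=
  let line := pvAloop starts pos starts.length 1 0 ((starts.length : Int) - 1)
  -- starts[line - 1]: in range on every input admitted by Pre_ (starts nonempty, 1 ≤ line ≤ len)
  let col := (pos - PySem.List.pyGetD starts (line - 1) 0) + 1
  (line, max 1 col)

-- ===== PORT B =====
-- the for loop of B: walk the list with its index, break at the first start > pos
def pvScan (pos : Int) : List Int → Int → Int → Int
  | [], _, line => line
  | s :: rest, i, line => if s > pos then line else pvScan pos rest (i + 1) (i + 1)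

def line_col_from_pos_py_alt (starts : List Int) (pos : Int) : Int × Int :=
  let line := pvScan pos starts 0 1
  -- starts[line - 1]: in range on every input admitted by Pre_ (starts nonempty, 1 ≤ line ≤ len)
  let col := (pos - PySem.List.pyGetD starts (line - 1) 0) + 1
  (line, max 1 col)

-- ===== PRECONDITION & SPEC =====
-- Pre_ excludes empty starts, where both A and B raise IndexError, and inputs on which some start > pos
-- precedes a start ≤ pos (starts unsorted around pos, violating the bisection invariant), where A's
-- binary-search answer is an accident of its probe order and neither program's value is specified.
def Pre_line_col_from_pos_py (starts : List Int) (pos : Int) : Prop :=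
  starts ≠ [] ∧ List.Pairwise (fun x y => x ≤ pos ∨ pos < y) starts
instance (starts : List Int) (pos : Int) : Decidable (Pre_line_col_from_pos_py starts pos) := by unfold Pre_line_col_from_pos_py; infer_instance

def pvWitness_line_col_from_pos_py : List Int × Int := ([0, 5, 9], 6)

def Spec_line_col_from_pos_py (starts : List Int) (pos : Int) (out : Int × Int) : Prop := out = line_col_from_pos_py_alt starts pos
instance (starts : List Int) (pos : Int) (out : Int × Int) : Decidable (Spec_line_col_from_pos_py starts pos out) := by unfold Spec_line_col_from_pos_py; infer_instance

-- ===== CLAIM (what is proved, stated in full; the proofs are below) =====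
def Claim_equal_line_col_from_pos_py : Prop := ∀ (starts : List Int) (pos : Int), Dom_line_col_from_pos_py starts pos → Pre_line_col_from_pos_py starts pos → Spec_line_col_from_pos_py starts pos (line_col_from_pos_py starts pos)

-- ===== LEMMAS AND PROOFS =====

-- the prefix property turns membership of '≤ pos' into an index threshold: starts[i] ≤ pos ↔ i < countP
theorem pv_char (starts : List Int) (pos : Int)
    (hs : List.Pairwise (fun x y => x ≤ pos ∨ pos < y) starts) :
    ∀ (i : Nat) (h : i < starts.length),
      (starts[i] ≤ pos ↔ i < starts.countP (fun s => decide (s ≤ pos))) := by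
  induction starts with
  | nil => intro i h; simp at h
  | cons s rest ih =>
    rcases List.pairwise_cons.mp hs with ⟨hall, hrest⟩
    intro i h
    by_cases hsp : s ≤ pos
    · have hc : (s :: rest).countP (fun s => decide (s ≤ pos))
          = rest.countP (fun s => decide (s ≤ pos)) + 1 := by
        simp [hsp]
      cases i with
      | zero => simp [hc, hsp]
      | succ j =>
        have hj : j < rest.length := by simpa using h
        have := ih hrest j hj
        simp only [List.getElem_cons_succ, hc]
        rw [this]
        omega
    · have hgt : ∀ x ∈ s :: rest, ¬ x ≤ pos := by
        intro x hx
        rcases List.mem_cons.mp hx with rfl | hx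
        · exact hsp
        · rcases hall x hx with h | h
          · exact absurd h hsp
          · omega
      have hc : (s :: rest).countP (fun s => decide (s ≤ pos)) = 0 := by
        rw [List.countP_eq_zero]
        intro x hx; simpa using hgt x hx
      have hmem : (s :: rest)[i] ∈ s :: rest := List.getElem_mem h
      simp only [hc]
      constructor
      · intro hle; exact absurd hle (hgt _ hmem)
      · intro hlt; omega

-- A's loop computes max 1 k under the threshold characterisation
theorem pv_aloop_max (starts : List Int) (pos : Int) (k : Nat)
    (hchar : ∀ (i : Nat) (h : i < starts.length), (starts[i] ≤ pos ↔ i < k)) :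
    ∀ (n : Nat) (line low high : Int), (high + 1 - low).toNat ≤ n →
      0 ≤ low → high ≤ (starts.length : Int) - 1 →
      low ≤ (k : Int) → (k : Int) ≤ high + 1 → line = max 1 low →
      pvAloop starts pos n line low high = max 1 (k : Int) := by
  intro n
  induction n with
  | zero =>
    intro line low high hn h0 hhi hlk hkh hline
    simp only [pvAloop]
    omega
  | succ n ih =>
    intro line low high hn h0 hhi hlk hkh hline
    simp only [pvAloop]
    by_cases hlh : low ≤ high
    · simp only [if_pos hlh]
      obtain ⟨hm1, hm2⟩ := PySem.Int.floordiv_two_mid_bounds hlh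
      set mid := PySem.Int.floordiv (low + high) 2 with hmid
      have hmid0 : 0 ≤ mid := le_trans h0 hm1
      have hmidlt : mid.toNat < starts.length := by omega
      have hget : PySem.List.pyGetD starts mid 0 = starts[mid.toNat]'(by omega) :=
        PySem.List.pyGetD_eq_getElem _ _ hmid0 (by omega)
      have hiff := hchar mid.toNat hmidlt
      by_cases hle : PySem.List.pyGetD starts mid 0 ≤ pos
      · have hmk : mid.toNat < k := hiff.mp (hget ▸ hle)
        simp only [if_pos hle]
        exact ih (mid + 1) (mid + 1) high (by omega) (by omega) hhi (by omega) hkh (by omega)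
      · have hmk : ¬ mid.toNat < k := fun h => hle (hget ▸ hiff.mpr h)
        simp only [if_neg hle]
        exact ih line low (mid - 1) (by omega) h0 (by omega) hlk (by omega) hline
    · simp only [if_neg hlh]
      omega

-- B's scan computes max 1 k under the same characterisation
theorem pv_scan_max (pos : Int) (k : Nat) :
    ∀ (l : List Int) (i line : Int), 0 ≤ i → i ≤ (k : Int) → (k : Int) ≤ i + l.length →
      (∀ (j : Nat) (h : j < l.length), (l[j] ≤ pos ↔ i + (j : Int) < k)) →
      line = max 1 i →
      pvScan pos l i line = max 1 (k : Int) := by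
  intro l
  induction l with
  | nil => intro i line h0 hik hki _ hline; simp only [pvScan]; simp at hki; omega
  | cons s rest ih =>
    intro i line h0 hik hki hchar hline
    simp only [pvScan]
    by_cases hgt : s > pos
    · have := (hchar 0 (by simp)).mpr
      simp only [List.getElem_cons_zero] at this
      have hki' : (k : Int) ≤ i := by
        by_contra hc
        exact absurd (this (by omega)) (by omega)
      simp only [if_pos hgt]
      omega
    · have hs : s ≤ pos := by omega
      have hik' : i + 1 ≤ (k : Int) := by
        have := (hchar 0 (by simp)).mp
        simp only [List.getElem_cons_zero] at this
        have := this hs; omega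
      simp only [if_neg hgt]
      exact ih (i + 1) (i + 1) (by omega) hik'
        (by simp only [List.length_cons] at hki; push_cast at hki ⊢; omega)
        (fun j hj => by
          have := hchar (j + 1) (by simpa using hj)
          simp only [List.getElem_cons_succ] at this
          constructor
          · intro h; have := this.mp h; push_cast at this ⊢; omega
          · intro h; exact this.mpr (by push_cast at h ⊢; omega))
        (by omega)

-- ===== VERDICT (by name: the statement is the Claim_ definition above) =====
theorem line_col_from_pos_py_spec : Claim_equal_line_col_from_pos_py := by
  intro starts pos _ hpre
  rcases hpre with ⟨hne, hsorted⟩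
  unfold Spec_line_col_from_pos_py line_col_from_pos_py line_col_from_pos_py_alt
  set k : Nat := starts.countP (fun s => decide (s ≤ pos)) with hk
  have hklen : k ≤ starts.length := List.countP_le_length
  have hchar := pv_char starts pos hsorted
  have hlen0 : 0 < starts.length := List.length_pos_iff.mpr hne
  have hA : pvAloop starts pos starts.length 1 0 ((starts.length : Int) - 1) = max 1 (k : Int) :=
    pv_aloop_max starts pos k hchar starts.length 1 0 ((starts.length : Int) - 1)
      (by omega) (by omega) (by omega) (by omega) (by omega) (by omega)
  have hB : pvScan pos starts 0 1 = max 1 (k : Int) :=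
    pv_scan_max pos k starts 0 1 (by omega) (by omega) (by omega)
      (fun j hj => by simpa using hchar j hj) (by omega)
  simp only [hA, hB]
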